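/- GENERATED by mk_final_copies.py from the proof of the farm's unit `vorbis_decode_packet` (farm:vorbis_decode_packet.2: Proof.lean) as the
   re-elaboration sweep compiled it — do not edit. -/
import Asan.CheckWalk
import Vorbis.Spec.Units.vorbis_decode_packet
import Vorbis.Spec.Worked.vorbis_decode_packet_Lemmas

/-
  vorbis_decode_packet (0x113660 … 0x11374a; stb_vorbis_fixed.c 3477–3481), a PROTECTED function: the proof is cut at
  `L.vorbis_decode_packet.cut1` = 0x1136d5 (after the call of vorbis_decode_initial) into three walks, all in work/Lemmas.lean:
      seg1       entry → the assertion `AtCut1` (prologue of the protected frame, call 1)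
      seg2_zero  AtCut1 ∧ eax = 0 → `Returned` (the single epilogue)
      seg2_one   AtCut1 ∧ eax = 1 → `Returned` (two checked loads, the call of vorbis_decode_packet_rest, the epilogue, W3)
  Here: the composition by `ReachVia.trans` and the case split on vorbis_decode_initial's result.
-/

open X86 X86.User Asan Vorbis Vorbis.Spec

/-- `vorbis_decode_packet` satisfies its contract. -/
theorem Vorbis.Spec.Worked.vorbis_decode_packet_ok : Vorbis.Spec.vorbis_decode_packet.Statement := by
  intro Lay hLay μ hμ u₀ hcode h_init h_load4 h_rest others frames len A stored room ysz u ret he hpre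
  -- 0x113660 … 0x1136d5: the prologue and the call of vorbis_decode_initial
  refine (Vorbis.Spec.vorbis_decode_packet.seg1 Lay hLay μ hμ u₀ hcode h_init others frames len A stored room ysz u ret he
    hpre).trans ?_
  intro v hat
  -- 0x1136d5: `test eax, eax ; jne`
  rcases hat.eax with hz | hz
  · exact Vorbis.Spec.vorbis_decode_packet.seg2_zero Lay hLay μ hμ u₀ hcode others frames len A stored room ysz u ret v hat hz
  · exact Vorbis.Spec.vorbis_decode_packet.seg2_one Lay hLay μ hμ u₀ hcode h_load4 h_rest others frames len A stored room ysz
      u ret v hat hz
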